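-- pv_equiv track=rewrite | github.com/Egraf99/Running_line | symbols.py | from_bottom_to_up_and_penultimate_without_bottom
-- ===== SOURCE A (Python) =====
-- def from_bottom_to_up_and_penultimate_without_bottom(pix_column: list, height: int, symbol_id, order_col) -> list:
--     for h in range(height):
--         if h == (height - order_col) and h < height - height // 3:
--             pix_column.append(symbol_id[0])
--         elif h == height - height // 3 and h != height - 1:
--             pix_column.append(symbol_id[1])
--         else:
--             pix_column.append(0)
--     return pix_column
-- ===== SOURCE B (Python) =====
-- def from_bottom_to_up_and_penultimate_without_bottom(pix_column: list, height: int, symbol_id, order_col) -> list: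
--     # Zero-fill the new rows at once, then do (at most) two guarded direct writes
--     # instead of testing every row in a loop.
--     base = len(pix_column)
--     if height > 0:
--         pix_column.extend([0] * height)
--     idx2 = height - height // 3
--     if 0 <= idx2 < height and idx2 != height - 1:
--         pix_column[base + idx2] = symbol_id[1]
--     idx1 = height - order_col
--     if 0 <= idx1 < height and idx1 < idx2:
--         pix_column[base + idx1] = symbol_id[0]
--     return pix_column
-- ===== Notes on version B (the rewrite author's own statement) =====
-- stated objective: simpler
-- what changed: Replaces A's per-row conditional loop with a bulk zero-fill of the new rows plus at most two guarded direct index writes.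
import Mathlib
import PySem

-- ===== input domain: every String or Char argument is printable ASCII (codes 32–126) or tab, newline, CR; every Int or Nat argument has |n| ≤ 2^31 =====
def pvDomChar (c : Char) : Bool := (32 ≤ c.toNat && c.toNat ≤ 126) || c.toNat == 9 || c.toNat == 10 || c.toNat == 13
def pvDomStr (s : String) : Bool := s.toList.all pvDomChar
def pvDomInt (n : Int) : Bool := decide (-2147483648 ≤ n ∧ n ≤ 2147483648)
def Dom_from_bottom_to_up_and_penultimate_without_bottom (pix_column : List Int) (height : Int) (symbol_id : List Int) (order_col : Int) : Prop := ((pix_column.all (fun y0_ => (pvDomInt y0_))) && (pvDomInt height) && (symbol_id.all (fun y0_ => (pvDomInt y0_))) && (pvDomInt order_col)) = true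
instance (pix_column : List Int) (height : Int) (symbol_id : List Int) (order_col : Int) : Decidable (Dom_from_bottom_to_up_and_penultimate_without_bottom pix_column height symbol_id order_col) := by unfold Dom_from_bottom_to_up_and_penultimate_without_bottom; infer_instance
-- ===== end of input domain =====

-- B replaces A's per-row conditional loop by a bulk zero-fill plus at most two
-- guarded direct writes (objective: simpler).  Both Pythons mutate pix_column
-- in place; the equivalence proved here is about the returned list's value.

-- ===== PORT A =====
-- Literal transliteration of A's loop: fold over range(height), appending one
-- element per row.  symbol_id[0]/[1] is pyGet? with .getD 0 — exact under Pre_,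
-- which excludes exactly the inputs where the Python subscript raises IndexError.
def from_bottom_to_up_and_penultimate_without_bottom (pix_column : List Int) (height : Int) (symbol_id : List Int) (order_col : Int) : List Int :=
  (PySem.List.pyRange 0 height 1).foldl (fun acc h =>
    if h = height - order_col ∧ h < height - PySem.Int.floordiv height 3 then
      acc ++ [(PySem.List.pyGet? symbol_id 0).getD 0]
    else if h = height - PySem.Int.floordiv height 3 ∧ h ≠ height - 1 then
      acc ++ [(PySem.List.pyGet? symbol_id 1).getD 0]
    else
      acc ++ [0]) pix_column

-- ===== PORT B =====
-- Transliteration of Source B: record base, extend with height zeros, then (at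
-- most) two guarded in-place index writes (List.set is exact here: the guards
-- keep both indices in range).
def from_bottom_to_up_and_penultimate_without_bottom_alt (pix_column : List Int) (height : Int) (symbol_id : List Int) (order_col : Int) : List Int :=
  let base := pix_column.length
  let col0 := if height > 0 then pix_column ++ List.replicate height.toNat 0 else pix_column
  let idx2 := height - PySem.Int.floordiv height 3
  let col1 := if 0 ≤ idx2 ∧ idx2 < height ∧ idx2 ≠ height - 1 then
      col0.set (base + idx2.toNat) ((PySem.List.pyGet? symbol_id 1).getD 0) else col0
  let idx1 := height - order_col
  if 0 ≤ idx1 ∧ idx1 < height ∧ idx1 < idx2 then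
    col1.set (base + idx1.toNat) ((PySem.List.pyGet? symbol_id 0).getD 0)
  else col1

-- ===== PRECONDITION & SPEC =====
-- Pre_ excludes exactly the inputs where Python A (and B) raises IndexError:
-- the row that reads symbol_id[0] (resp. symbol_id[1]) exists but symbol_id is
-- too short for that subscript.
def Pre_from_bottom_to_up_and_penultimate_without_bottom (pix_column : List Int) (height : Int) (symbol_id : List Int) (order_col : Int) : Prop :=
  ((0 ≤ height - order_col ∧ height - order_col < height ∧
      height - order_col < height - PySem.Int.floordiv height 3) → 1 ≤ symbol_id.length) ∧
  ((0 ≤ height - PySem.Int.floordiv height 3 ∧ height - PySem.Int.floordiv height 3 < height ∧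
      height - PySem.Int.floordiv height 3 ≠ height - 1) → 2 ≤ symbol_id.length)
instance (pix_column : List Int) (height : Int) (symbol_id : List Int) (order_col : Int) : Decidable (Pre_from_bottom_to_up_and_penultimate_without_bottom pix_column height symbol_id order_col) := by unfold Pre_from_bottom_to_up_and_penultimate_without_bottom; infer_instance
def pvWitness_from_bottom_to_up_and_penultimate_without_bottom : List Int × Int × List Int × Int := ([7], 9, [1, 2], 3)

def Spec_from_bottom_to_up_and_penultimate_without_bottom (pix_column : List Int) (height : Int) (symbol_id : List Int) (order_col : Int) (out : List Int) : Prop := out = from_bottom_to_up_and_penultimate_without_bottom_alt pix_column height symbol_id order_col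
instance (pix_column : List Int) (height : Int) (symbol_id : List Int) (order_col : Int) (out : List Int) : Decidable (Spec_from_bottom_to_up_and_penultimate_without_bottom pix_column height symbol_id order_col out) := by unfold Spec_from_bottom_to_up_and_penultimate_without_bottom; infer_instance

-- ===== CLAIM (what is proved, stated in full; the proofs are below) =====
def Claim_equal_from_bottom_to_up_and_penultimate_without_bottom : Prop := ∀ (pix_column : List Int) (height : Int) (symbol_id : List Int) (order_col : Int), Dom_from_bottom_to_up_and_penultimate_without_bottom pix_column height symbol_id order_col → Pre_from_bottom_to_up_and_penultimate_without_bottom pix_column height symbol_id order_col → Spec_from_bottom_to_up_and_penultimate_without_bottom pix_column height symbol_id order_col (from_bottom_to_up_and_penultimate_without_bottom pix_column height symbol_id order_col)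

-- ===== LEMMAS AND PROOFS =====

-- the value A's loop appends for row h
def pvRowVal (height : Int) (symbol_id : List Int) (order_col : Int) (h : Int) : Int :=
  if h = height - order_col ∧ h < height - PySem.Int.floordiv height 3 then
    (PySem.List.pyGet? symbol_id 0).getD 0
  else if h = height - PySem.Int.floordiv height 3 ∧ h ≠ height - 1 then
    (PySem.List.pyGet? symbol_id 1).getD 0
  else 0

-- the block of new rows as B builds it (without the base offset)
def pvColB (height : Int) (symbol_id : List Int) (order_col : Int) : List Int :=
  let c1 := if 0 ≤ height - PySem.Int.floordiv height 3 ∧ height - PySem.Int.floordiv height 3 < height ∧ height - PySem.Int.floordiv height 3 ≠ height - 1 then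
      (List.replicate height.toNat (0 : Int)).set (height - PySem.Int.floordiv height 3).toNat ((PySem.List.pyGet? symbol_id 1).getD 0)
    else List.replicate height.toNat 0
  if 0 ≤ height - order_col ∧ height - order_col < height ∧ height - order_col < height - PySem.Int.floordiv height 3 then
    c1.set (height - order_col).toNat ((PySem.List.pyGet? symbol_id 0).getD 0)
  else c1

theorem pvA_eq_append (pix_column : List Int) (height : Int) (symbol_id : List Int) (order_col : Int) :
    from_bottom_to_up_and_penultimate_without_bottom pix_column height symbol_id order_col
      = pix_column ++ (List.range height.toNat).map
          (fun (k : Nat) => pvRowVal height symbol_id order_col (k : Int)) := by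
  unfold from_bottom_to_up_and_penultimate_without_bottom
  have hf : (fun (acc : List Int) (h : Int) =>
      if h = height - order_col ∧ h < height - PySem.Int.floordiv height 3 then
        acc ++ [(PySem.List.pyGet? symbol_id 0).getD 0]
      else if h = height - PySem.Int.floordiv height 3 ∧ h ≠ height - 1 then
        acc ++ [(PySem.List.pyGet? symbol_id 1).getD 0]
      else acc ++ [0])
      = fun acc h => acc ++ [pvRowVal height symbol_id order_col h] := by
    funext acc h
    unfold pvRowVal
    split_ifs <;> rfl
  rw [hf, PySem.List.foldl_append_singleton_eq_map, PySem.List.pyRange_one, List.map_map]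
  simp only [Int.sub_zero, Function.comp_def, zero_add]

theorem pvB_eq_append (pix_column : List Int) (height : Int) (symbol_id : List Int) (order_col : Int) :
    from_bottom_to_up_and_penultimate_without_bottom_alt pix_column height symbol_id order_col
      = pix_column ++ pvColB height symbol_id order_col := by
  unfold from_bottom_to_up_and_penultimate_without_bottom_alt pvColB
  have hc0 : (if height > 0 then pix_column ++ List.replicate height.toNat (0 : Int) else pix_column)
      = pix_column ++ List.replicate height.toNat 0 := by
    split_ifs with h
    · rfl
    · have hn : height.toNat = 0 := by omega
      simp [hn]
  have hset : ∀ (l : List Int) (k : Nat) (v : Int),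
      (pix_column ++ l).set (pix_column.length + k) v = pix_column ++ l.set k v := by
    intro l k v
    rw [List.set_append]
    simp
  simp only [hc0]
  split_ifs <;> simp only [hset]

theorem pvCol_eq (height : Int) (symbol_id : List Int) (order_col : Int) :
    (List.range height.toNat).map (fun (k : Nat) => pvRowVal height symbol_id order_col (k : Int))
      = pvColB height symbol_id order_col := by
  unfold pvColB
  apply List.ext_getElem
  · split_ifs <;> simp
  · intro i h1 h2
    have hi : i < height.toNat := by simpa using h1
    simp only [List.getElem_map, List.getElem_range]
    unfold pvRowVal
    split_ifs <;>
      simp only [List.getElem_set, List.getElem_replicate] <;>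
      first
        | rfl
        | omega

-- ===== VERDICT (by name: the statement is the Claim_ definition above) =====
theorem from_bottom_to_up_and_penultimate_without_bottom_spec : Claim_equal_from_bottom_to_up_and_penultimate_without_bottom := by
  intro pix_column height symbol_id order_col _ _
  unfold Spec_from_bottom_to_up_and_penultimate_without_bottom
  rw [pvA_eq_append, pvB_eq_append, pvCol_eq]
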